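/- GENERATED by mk_final_copies.py from the proof of the farm's unit `start_decoder.F5e` (farm:start_decoder.F5e.1: Proof.lean) as the
   re-elaboration sweep compiled it — do not edit. -/
import Asan.CheckWalk
import Vorbis.Spec.Reader
import Vorbis.Spec.Units.start_decoder_F5e

open X86 X86.User Asan Vorbis Vorbis.Spec Vorbis.Spec.StartDecoder

set_option maxRecDepth 4000
set_option maxHeartbeats 4000000

namespace Vorbis.Spec.start_decoder_F5e

/-- A byte zero-extended to 32 bits, as a number. -/
theorem f5e_zx8_toNat (x : Nat) (h : x < 256) : (BitVec.zeroExtend 32 (BitVec.ofNat 8 x)).toNat = x := by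
  simp only [BitVec.truncate_eq_setWidth, BitVec.toNat_setWidth, BitVec.toNat_ofNat]
  omega

/-- A byte zero-extended to 32 bits, as a signed number (what `cmp eax, r15d ; jg` compares). -/
theorem f5e_zx8_toInt (x : Nat) (h : x < 256) : (BitVec.zeroExtend 32 (BitVec.ofNat 8 x)).toInt = (x : Int) := by
  have e := f5e_zx8_toNat x h
  rw [BitVec.toInt_eq_toNat_cond, e]
  have h2 : 2 * x < 2 ^ 32 := by omega
  simp only [h2, if_true]

/-- A byte zero-extended into a register, as a number (`movzx esi, byte [rbx+635H]`: the bit count of get_bits). -/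
theorem f5e_zx8_word (x : Nat) (h : x < 256) : (Word.ofBV (BitVec.zeroExtend 32 (BitVec.ofNat 8 x))).toNat = x := by
  unfold Word.ofBV
  simp only [UInt64.toNat_ofBitVec, BitVec.truncate_eq_setWidth, BitVec.toNat_setWidth, BitVec.toNat_ofNat]
  omega

/-- **Segment F5e of `start_decoder`** (`cut219` = `loop21` 0x1156c8 … 0x1156e2, and 0x115664 … 0x11567a; C lines 4009 – 4010): the
class `c` reloaded from `[R+38H]`, the checked load of `class_dimensions[c]`, the loop test; `k ≥ d`: `++j`, the head of loop 4007
(`F5Inner.next_outer`); else the checked load of `rangebits` and `call get_bits(f, rangebits)`, exit at its return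
(`F5Inner.keep_same`). -/
theorem f5e_walk {Lay : Layout} (hLay : Lay.hi = 0x1000000) {μ : Microarch} (hμ : UserX.MicroOK μ) {u₀ : State}
    (hcode : HasCodeNat Lay u₀ Vorbis.L.start_decoder.entry Vorbis.Code.code_start_decoder.nat Vorbis.L.start_decoder.size)
    (h_gb : ∀ (others : List Obj) (frames : List (Nat × FrameLayout)) (Blk : Block → Prop) (len : Nat),
      Calls Lay μ Vorbis.WayInv (Vorbis.conv u₀) Vorbis.L.get_bits.entry (Vorbis.Spec.get_bits.spec others frames Blk len))
    (hld1 : Asan.SmallCheck Lay μ Vorbis.WayInv (Vorbis.CodeOK u₀) [.rax, .rdx] 1 Vorbis.L.__asan_load1_noabort.entry)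
    {g : Ghost} {i : Nat} {A5 : Arena} {A : Arena × List Obj} {mc : Int} {n P j c d k : Nat} {v : State}
    (hat : F5Inner u₀ g i A5 A mc n P j c d k Vorbis.L.start_decoder.cut219 v) :
    ReachVia Lay μ WayInv v (fun w => F5Outer u₀ g i A5 A mc n P (j + 1) w ∨ F5After u₀ g i A5 A mc n P j c d k w) := by
  have hb := hat.part.in5
  have hf := hb.loop.frame
  have he := hf.entry
  v_entry he
  have hgb := h_gb A.2 g.frames' (g.Blk A) g.len
  obtain ⟨r8, rlo, rhi, ra, flo, fhi, fstack, farena, flog, fc1, fc64, ilt, gdef, blo, bhi, btext, bstack, bdata, blog⟩ := hb.geo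
  have hP31 : P ≤ 31 := by
    rw [← hat.part.parts]
    exact hb.cur.base.FL4
  have hjP := hat.j_lt
  have hc15 := hat.c_le
  have hd8 := hat.d_le
  have hkd := hat.k_le
  have hsitec := hb.site (0x21 + c) 1 (by omega) (by simp only [voff]; omega)
  have hsiter := hb.site 0x635 1 (by omega) (by simp only [voff]; omega)
  -- the three addresses as numbers (the walker sees `UInt64.ofNat R`, not `addr g.R`)
  obtain ⟨R, hR⟩ : ∃ R, R = g.R := ⟨_, rfl⟩
  obtain ⟨f, hfe⟩ : ∃ f, f = g.f := ⟨_, rfl⟩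
  obtain ⟨gi, hgi⟩ : ∃ gi, gi = floorAt g v.mem i := ⟨_, rfl⟩
  have c_rip := hf.rip
  have c_rsp := hf.rsp
  have c_rbp := hb.loop.rbp
  have c_rbx := hb.rbx
  have c_r13 : v.reg .r13 = UInt64.ofNat j := hat.part.r13
  have c_r15 : v.reg .r15 = UInt64.ofNat k := hat.r15
  rw [← hR] at c_rsp r8 rlo rhi ra fstack
  rw [← hfe] at c_rbp flo fhi fstack farena flog
  rw [← hgi] at c_rbx gdef hsitec hsiter
  simp only [addr] at c_rsp c_rbp c_rbx
  have c_eq : Mem.EqOn Vorbis.L.textLo Vorbis.L.textHi u₀.mem v.mem := hf.code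
  have hdf : v.flags .df = false := (show abiInv _ from hf.inv).1
  have hmx : v.mxcsr &&& 0x1F80 = 0x1F80 := (show abiInv _ from hf.inv).2
  have hsse := Vorbis.sseOK_of_abiInv hf.inv
  have hgw : 0x119d40 ≤ gi ∧ gi + 1596 ≤ 0xC00000 ∧ (gi + 1596 ≤ 0x700000 ∨ 0x800000 ≤ gi) := by
    omega
  have hgf : gi + 1596 ≤ f ∨ f + 1808 ≤ gi := by
    omega
  clear fc1 fc64 ilt gdef blo bhi btext bstack bdata blog
  -- the loads of the piece, named before the walk: the spilled class, `class_dimensions[c]`, `rangebits`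
  have hslot : v.mem.readLE (UInt64.ofNat R + 56) 4 = c := by
    have h := hat.slot_c
    have ea : addr (R + 0x38) = UInt64.ofNat R + 56 := by
      apply UInt64.toNat_inj.mp
      rw [toNat_addr _ (by omega)]
      u_omega
    unfold StartDecoder.slot Mem.u32 at h
    rw [← hR, ea] at h
    exact h
  have hdim : v.mem.readLE (UInt64.ofNat gi + UInt64.ofNat c + 33) 1 = d := by
    have h := hat.dim
    have ea : addr (gi + 33 + c) = UInt64.ofNat gi + UInt64.ofNat c + 33 := by
      apply UInt64.toNat_inj.mp
      rw [toNat_addr _ (by omega)]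
      u_omega
    rw [← hgi] at h
    simp only [vacc, voff] at h
    unfold Mem.u8 at h
    rw [ea] at h
    exact h
  have hrb15 : Floor1.rangebits v.mem gi ≤ 15 := by
    rw [hgi]
    exact hat.xl.rb
  obtain ⟨rb, hrb⟩ : ∃ rb, rb = Floor1.rangebits v.mem gi := ⟨_, rfl⟩
  rw [← hrb] at hrb15
  have hrbl : v.mem.readLE (UInt64.ofNat gi + 1589) 1 = rb := by
    have ea : addr (gi + 1589) = UInt64.ofNat gi + 1589 := by
      apply UInt64.toNat_inj.mp
      rw [toNat_addr _ (by omega)]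
      u_omega
    rw [hrb]
    simp only [vacc, voff]
    unfold Mem.u8
    rw [ea]
  u_walk hcode [hμ.vendor, Vorbis.Spec.cnt32_part j, Vorbis.Spec.cnt32_part k, Vorbis.Spec.cnt32_sext_bv c (by omega),
      Vorbis.Spec.cnt32_succ j (by omega)]
    until [Vorbis.L.start_decoder.cut220, Vorbis.L.start_decoder.cut218] span [Vorbis.L.textLo, Vorbis.L.textHi] side (v_side)
  case check_1156d2 =>
    -- the byte `class_dimensions[c]`
    have hun : ShadowUntouched v.mem s_1156d2.mem := by v_untouched
    exact Vorbis.Spec.check_site hf.shadow hun hsitec (by u_omega)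
  case check_11566b =>
    -- the byte `rangebits`
    have hun : ShadowUntouched v.mem s_11566b.mem := by v_untouched
    exact Vorbis.Spec.check_site hf.shadow hun hsiter (by u_omega)
  case call_inv => v_inv
  case pre_11567a =>
    have hun : ShadowUntouched v.mem s_11567a.mem := by v_untouched
    have hrdi : (s_11567a.reg .rdi).toNat = g.f := by
      rw [w_rdi, ← hfe]
      exact toNat_addr f (by omega)
    refine ⟨Floor.reader_pre hb.loop ?_ hun hrdi ?_, ?_⟩
    · rw [w_rsp, ← hR]
      u_omega
    · rw [w_mem]
      refine Floor.bits_push hb.loop _ 8 _ ?_ ?_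
      · rw [← hR]
        u_omega
      · u_omega
    · rw [bitsArg_def, w_rsi, f5e_zx8_word rb (by omega)]
      omega
  · -- `k < d`: after the return of get_bits(f, rangebits), the cut point 0x11567f
    rw [f5e_zx8_toInt d (by omega), Vorbis.Spec.cnt32_toInt k (by omega)] at hbr_1156e0
    have hklt : k < d := by omega
    have hrdi : (s_11567a.reg .rdi).toNat = f := by
      rw [w_rdi_11567a]
      exact toNat_addr f (by omega)
    obtain ⟨hpu, hpb⟩ := w_post
    rw [hrdi] at hpb
    v_after_call w_rsp_11567a w_mem_11567a
    simp only [w_rdi_11567a] at w_same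
    have hun0 : ShadowUntouched v.mem s_11567a.mem := by
      rw [w_mem_11567a]
      v_untouched
    have hun : ShadowUntouched v.mem s_11567ar.mem := Mem.EqOn.trans hun0 hpu
    -- the spilled class, through get_bits' footprint
    have hp1 : s_11567a.mem.readLE (UInt64.ofNat R + 56) 4 = c := by
      have t1 : (UInt64.ofNat R - 8).toNat = R - 8 := by u_omega
      have t2 : (UInt64.ofNat R + 56).toNat = R + 56 := by u_omega
      rw [w_mem_11567a, Mem.readLE_writeLE_disjoint_noWrap _ _ 8 _ _ 4 (by unfold Mem.NoWrap; omega) (by unfold Mem.NoWrap; omega)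
        (by omega)]
      exact hslot
    rw [w_mem_11567a] at hp1
    have hslot' : s_11567ar.mem.readLE (UInt64.ofNat R + 56) 4 = c := by
      rcases fstack with g4 | g4 | g4
      · u_frame hp1
      · u_frame hp1
      · u_frame hp1
    have hsame : Mem.SameExcept [⟨R - 408, R⟩, ⟨f + 48, f + 56⟩, ⟨f + 84, f + 96⟩, ⟨f + 136, f + 144⟩,
        ⟨f + 1484, f + 1749⟩, ⟨f + 1752, f + 1784⟩] v.mem s_11567ar.mem := by
      u_same
    have earg : bitsArg s_11567a = rb := by
      rw [bitsArg_def, w_rsi_11567a, f5e_zx8_word rb (by omega)]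
      omega
    have hws : ∀ w, w ∈ ([⟨R - 408, R⟩, ⟨f + 48, f + 56⟩, ⟨f + 84, f + 96⟩, ⟨f + 136, f + 144⟩,
        ⟨f + 1484, f + 1749⟩, ⟨f + 1752, f + 1784⟩] : List Span) →
        Floor.Win g (floorAt g v.mem i) 1596 1596 w := by
      intro w hw
      simp only [List.mem_cons, List.mem_nil_iff, or_false] at hw
      unfold Floor.Win
      rw [← hR, ← hfe]
      rcases hw with rfl | rfl | rfl | rfl | rfl | rfl
      all_goals simp only []
      all_goals omega
    have e1 : s_11567ar.reg .rsp = addr g.R := by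
      rw [w_rsp, hR]
      rfl
    have e2 : s_11567ar.reg .rbp = addr g.f := by
      rw [w_kept .rbp rfl, c_rbp, hfe]
      rfl
    have e3 : s_11567ar.reg .rbx = addr (floorAt g v.mem i) := by
      rw [w_kept .rbx rfl, c_rbx, hgi]
      rfl
    have e4 : s_11567ar.reg .r13 = addr j := by
      rw [w_kept .r13 rfl, c_r13]
      rfl
    have e5 : s_11567ar.reg .r15 = addr k := by
      rw [w_kept .r15 rfl, c_r15]
      rfl
    have hbits' : Bits (g.Blk A) g.len s_11567ar.mem g.f := by
      rw [← hfe]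
      exact hpb.bits
    have hin := hb.keep w_rip e1 e2 e3 w_inv w_eq hsame hws (by omega) (Nat.le_refl _) (Nat.le_refl _) hun hbits'
    obtain ⟨hs, hg⟩ := hb.elem_same hsame hws
    obtain ⟨eG, _, _, _⟩ := Floor.fields_same hb.geo hsame hws (Nat.le_refl _)
    have hslot2 : StartDecoder.slot g s_11567ar.mem 0x38 = c := by
      have ea : addr (R + 0x38) = UInt64.ofNat R + 56 := by
        apply UInt64.toNat_inj.mp
        rw [toNat_addr _ (by omega)]
        u_omega
      unfold StartDecoder.slot Mem.u32
      rw [← hR, ea]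
      exact hslot'
    have hinner := hat.keep_same hin hs hg eG e4 e5 hslot2
    refine ReachVia.done (Or.inr ⟨hinner, hklt, ?_⟩)
    have h2 := hpb.result.2 (by rw [earg]; omega)
    rw [earg] at h2
    rw [eG, Floor1.same_rangebits hs hg, ← hgi, ← hrb]
    exact h2
  · -- `k ≥ d`: `++j`, the head of loop 4007 (0x1156e6)
    rw [f5e_zx8_toInt d (by omega), Vorbis.Spec.cnt32_toInt k (by omega)] at hbr_1156e0
    have hdk : d ≤ k := by omega
    have hun : ShadowUntouched v.mem s_1156e2.mem := by v_untouched
    have hsame : Mem.SameExcept [⟨R - 408, R⟩] v.mem s_1156e2.mem := by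
      u_same
    have hws : ∀ w, w ∈ ([⟨R - 408, R⟩] : List Span) → Floor.Win g (floorAt g v.mem i) 1596 1596 w := by
      intro w hw
      simp only [List.mem_cons, List.mem_nil_iff, or_false] at hw
      unfold Floor.Win
      rw [← hR, hw]
      simp only []
      omega
    have hbits : Bits (g.Blk A) g.len s_1156e2.mem g.f := by
      rw [w_mem]
      refine Floor.bits_push hb.loop _ 8 _ ?_ ?_
      · rw [← hR]
        u_omega
      · u_omega
    have hinv : abiInv s_1156e2 := by
      refine Vorbis.abiInv_of ?_ ?_
      · rw [w_flags]
        simp only [X86.User.df_setStatus]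
        exact w_df_1156d2
      · rw [w_mxcsr]
        exact hmx
    have e1 : s_1156e2.reg .rsp = addr g.R := by
      rw [w_rsp, hR]
      rfl
    have e2 : s_1156e2.reg .rbp = addr g.f := by
      rw [w_kept .rbp rfl, c_rbp, hfe]
      rfl
    have e3 : s_1156e2.reg .rbx = addr (floorAt g v.mem i) := by
      rw [w_kept .rbx rfl, c_rbx, hgi]
      rfl
    have e4 : s_1156e2.reg .r13 = addr (j + 1) := by
      rw [w_r13, ← Vorbis.Spec.cnt32_part j, Vorbis.Spec.cnt32_succ j (by omega)]
      rfl
    have hin := hb.keep w_rip e1 e2 e3 hinv w_eq hsame hws (by omega) (Nat.le_refl _) (Nat.le_refl _) hun hbits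
    obtain ⟨hs, hg⟩ := hb.elem_same hsame hws
    obtain ⟨eG, _, _, _⟩ := Floor.fields_same hb.geo hsame hws (Nat.le_refl _)
    exact ReachVia.done (Or.inl (hat.next_outer hdk hin hs hg eG e4))

end Vorbis.Spec.start_decoder_F5e

/-- Unit `start_decoder.F5e`: `f5e_walk` at every entry state. -/
theorem Vorbis.Spec.Worked.start_decoder_F5e_ok : Vorbis.Spec.start_decoder_F5e.Statement := by
  intro Lay hLay μ hμ u₀ hcode h_gb hld1 g i A5 A mc n P j c d k v hat
  exact Vorbis.Spec.start_decoder_F5e.f5e_walk hLay hμ hcode h_gb hld1 hat
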